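-- pv_equiv track=rewrite | github.com/Vantime03/Python-Full-Stack-Course | Python/Practice String/problem5_practice_string.py | Is_count_even
-- ===== SOURCE A (Python) =====
-- def Is_count_even(user_input):
--     user_input = user_input.replace(" ", "") # eliminate spaces
--     word = ""
--     dog = 0
--     cat = 0
--     for char in user_input:
--         if char in ["d", "o", "g", "c", "a", "t"]:
--             word += char
--             if word == "dog":
--                 dog += 1
--                 word = ""
--             elif word == "cat":
--                 cat += 1
--                 word = ""
--     if dog == cat:
--         return True
--     else:
--         return False
-- ===== SOURCE B (Python) =====
-- def Is_count_even(user_input):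
--     # chunk-of-3 scan over the filtered characters instead of A's char-by-char buffer state machine
--     s = [ch for ch in user_input if ch in "dogcat"]
--     dog = 0
--     cat = 0
--     while s:
--         if s[:3] == ['d', 'o', 'g']:
--             dog += 1
--         elif s[:3] == ['c', 'a', 't']:
--             cat += 1
--         else:
--             break
--         s = s[3:]
--     return dog == cat
-- ===== Notes on version B (the rewrite author's own statement) =====
-- stated objective: simpler
-- what changed: Replaces A's char-by-char buffer-accumulation state machine with a single filter pass followed by a chunk-of-3 scan that stops at the first non-matching chunk.
import Mathlib
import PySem

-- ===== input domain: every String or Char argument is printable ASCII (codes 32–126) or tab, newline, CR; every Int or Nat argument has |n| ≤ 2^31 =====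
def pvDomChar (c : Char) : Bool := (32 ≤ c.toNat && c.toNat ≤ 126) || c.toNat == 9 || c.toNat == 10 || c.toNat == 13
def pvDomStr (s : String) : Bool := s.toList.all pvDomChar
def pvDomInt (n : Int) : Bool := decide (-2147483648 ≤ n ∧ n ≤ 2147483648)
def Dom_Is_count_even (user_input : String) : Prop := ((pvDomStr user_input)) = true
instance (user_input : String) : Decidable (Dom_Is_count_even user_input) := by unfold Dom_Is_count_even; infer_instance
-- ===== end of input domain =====

-- B replaces A's char-by-char buffer state machine with a filter + chunk-of-3 scan (objective: simpler).

-- ===== PORT A =====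
def pvSet : List Char := ['d', 'o', 'g', 'c', 'a', 't']

def aStep (st : List Char × Int × Int) (ch : Char) : List Char × Int × Int :=
  if ch ∈ pvSet then
    let w := st.1 ++ [ch]
    if w = ['d', 'o', 'g'] then ([], st.2.1 + 1, st.2.2)
    else if w = ['c', 'a', 't'] then ([], st.2.1, st.2.2 + 1)
    else (w, st.2.1, st.2.2)
  else st

def Is_count_even (user_input : String) : Bool :=
  let ui := PySem.Str.replace user_input " " ""
  let st := ui.toList.foldl aStep ([], 0, 0)
  if st.2.1 = st.2.2 then true else false

-- ===== PORT B =====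
def altLoop : List Char → Int → Int → Bool
  | [], dog, cat => dog == cat
  | c1 :: t, dog, cat =>
    if (c1 :: t).take 3 = ['d', 'o', 'g'] then altLoop ((c1 :: t).drop 3) (dog + 1) cat
    else if (c1 :: t).take 3 = ['c', 'a', 't'] then altLoop ((c1 :: t).drop 3) dog (cat + 1)
    else dog == cat
termination_by s _ _ => s.length
decreasing_by all_goals (simp [List.length_drop]; try omega)

def Is_count_even_alt (user_input : String) : Bool :=
  altLoop (user_input.toList.filter (fun c => c ∈ pvSet)) 0 0

-- ===== PRECONDITION & SPEC =====
def Spec_Is_count_even (user_input : String) (out : Bool) : Prop := out = Is_count_even_alt user_input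
instance (user_input : String) (out : Bool) : Decidable (Spec_Is_count_even user_input out) := by unfold Spec_Is_count_even; infer_instance

-- ===== CLAIM (what is proved, stated in full; the proofs are below) =====
def Claim_equal_Is_count_even : Prop := ∀ (user_input : String), Dom_Is_count_even user_input → Spec_Is_count_even user_input (Is_count_even user_input)

-- ===== LEMMAS AND PROOFS =====

-- replace.go with old = [' '], new = [] just deletes spaces (fuel is sufficient)
theorem go_filter (fuel : Nat) : ∀ (l acc : List Char), l.length ≤ fuel →
    PySem.Chars.replace.go [' '] [] fuel l acc = acc.reverse ++ l.filter (fun c => c ≠ ' ') := by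
  induction fuel with
  | zero =>
    intro l acc h
    have : l = [] := List.eq_nil_of_length_eq_zero (Nat.le_zero.mp h)
    subst this; simp [PySem.Chars.replace.go]
  | succ n ih =>
    intro l acc h
    cases l with
    | nil => simp [PySem.Chars.replace.go]
    | cons c t =>
      by_cases hc : c = ' '
      · subst hc
        rw [PySem.Chars.replace.go, if_pos (by simp [List.isPrefixOf])]
        have h' : t.length ≤ n := by simpa using Nat.le_of_succ_le_succ h
        simpa using ih t acc h'
      · have hc' : ((' ' : Char) == c) = false := by
          simp [beq_eq_false_iff_ne]; exact fun h => hc h.symm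
        rw [PySem.Chars.replace.go, if_neg (by simp [List.isPrefixOf, hc'])]
        have h' : t.length ≤ n := by simpa using Nat.le_of_succ_le_succ h
        rw [ih t (c :: acc) h']
        simp [hc]

theorem replace_space_toList (s : String) :
    (PySem.Str.replace s " " "").toList = s.toList.filter (fun c => c ≠ ' ') := by
  rw [PySem.Str.toList_replace]
  show PySem.Chars.replace s.toList [' '] [] = _
  rw [PySem.Chars.replace, if_neg (by decide)]
  exact go_filter s.toList.length s.toList [] (le_refl _)

-- the fold ignores characters outside pvSet
theorem foldl_filter_set : ∀ (l : List Char) (st : List Char × Int × Int),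
    l.foldl aStep st = (l.filter (fun c => c ∈ pvSet)).foldl aStep st := by
  intro l
  induction l with
  | nil => intro st; rfl
  | cons c t ih =>
    intro st
    by_cases hc : c ∈ pvSet
    · rw [List.foldl_cons, List.filter_cons, if_pos (by simpa using hc), List.foldl_cons]
      exact ih (aStep st c)
    · rw [List.foldl_cons, List.filter_cons, if_neg (by simpa using hc),
        show aStep st c = st by simp [aStep, hc]]
      exact ih st

-- once the buffer has length ≥ 3 it never matches again: counts are frozen
theorem stuck : ∀ (l w : List Char) (d c : Int), 3 ≤ w.length →
    (l.foldl aStep (w, d, c)).2 = (d, c) := by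
  intro l
  induction l with
  | nil => intro w d c _; rfl
  | cons ch t ih =>
    intro w d c hw
    by_cases hm : ch ∈ pvSet
    · have h4 : (w ++ [ch]).length = w.length + 1 := by simp
      have hnd : ¬(w ++ [ch] = ['d', 'o', 'g']) := by
        intro h; apply_fun List.length at h; simp at h; omega
      have hnc : ¬(w ++ [ch] = ['c', 'a', 't']) := by
        intro h; apply_fun List.length at h; simp at h; omega
      simp only [List.foldl_cons, aStep, if_pos hm, if_neg hnd, if_neg hnc]
      exact ih (w ++ [ch]) d c (by simp; omega)
    · simp only [List.foldl_cons, aStep, if_neg hm]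
      exact ih w d c hw

-- main invariant: on an all-in-set list, A's fold and B's chunk scan agree on count equality
theorem main_lemma (n : Nat) : ∀ (l : List Char) (d c : Int), l.length ≤ n →
    (∀ ch ∈ l, ch ∈ pvSet) →
    (((l.foldl aStep ([], d, c)).2.1 == (l.foldl aStep ([], d, c)).2.2) : Bool)
      = altLoop l d c := by
  induction n with
  | zero =>
    intro l d c h _
    have : l = [] := List.eq_nil_of_length_eq_zero (Nat.le_zero.mp h)
    subst this; simp [altLoop]
  | succ n ih =>
    intro l d c hlen hmem
    match l with
    | [] => simp [altLoop]
    | [c1] =>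
      have h1 : c1 ∈ pvSet := hmem c1 (by simp)
      simp [altLoop, List.foldl_cons, aStep, h1]
    | [c1, c2] =>
      have h1 : c1 ∈ pvSet := hmem c1 (by simp)
      have h2 : c2 ∈ pvSet := hmem c2 (by simp)
      simp [altLoop, List.foldl_cons, aStep, h1, h2]
    | c1 :: c2 :: c3 :: rest =>
      have h1 : c1 ∈ pvSet := hmem c1 (by simp)
      have h2 : c2 ∈ pvSet := hmem c2 (by simp)
      have h3 : c3 ∈ pvSet := hmem c3 (by simp)
      have hlen' : rest.length ≤ n := by simp at hlen; omega
      have hmem' : ∀ ch ∈ rest, ch ∈ pvSet := fun ch h => hmem ch (by simp [h])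
      by_cases hdog : c1 = 'd' ∧ c2 = 'o' ∧ c3 = 'g'
      · obtain ⟨e1, e2, e3⟩ := hdog
        subst e1; subst e2; subst e3
        rw [altLoop]
        simp only [List.foldl_cons, aStep, pvSet]
        simp [ih rest (d + 1) c hlen' hmem']
      · by_cases hcat : c1 = 'c' ∧ c2 = 'a' ∧ c3 = 't'
        · obtain ⟨e1, e2, e3⟩ := hcat
          subst e1; subst e2; subst e3
          rw [altLoop]
          simp only [List.foldl_cons, aStep, pvSet]
          simp [ih rest d (c + 1) hlen' hmem']
        · rw [altLoop]
          simp only [List.foldl_cons, aStep, if_pos h1, if_pos h2, if_pos h3]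
          simp only [List.nil_append, List.cons.injEq, and_true, List.take_succ_cons, List.take_zero]
          have hs : ∀ p : List Char × Int × Int, p = ([c1, c2, c3], d, c) →
              ((rest.foldl aStep p).2.1 == (rest.foldl aStep p).2.2) = (d == c) := by
            intro p hp; subst hp
            have := stuck rest [c1, c2, c3] d c (by simp)
            rw [show (rest.foldl aStep ([c1, c2, c3], d, c)).2.1 = d by rw [this]]
            rw [show (rest.foldl aStep ([c1, c2, c3], d, c)).2.2 = c by rw [this]]
          simp [hdog, hcat, hs]

theorem filter_set_of_nospace (l : List Char) :
    (l.filter (fun c => c ≠ ' ')).filter (fun c => c ∈ pvSet) = l.filter (fun c => c ∈ pvSet) := by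
  rw [List.filter_filter]
  apply List.filter_congr
  intro c _
  by_cases hc : c ∈ pvSet
  · have hne : c ≠ ' ' := by
      simp only [pvSet, List.mem_cons, List.not_mem_nil, or_false] at hc
      rcases hc with h | h | h | h | h | h <;> subst h <;> decide
    simp [hc, hne]
  · simp [hc]

-- ===== VERDICT (by name: the statement is the Claim_ definition above) =====
theorem Is_count_even_spec : Claim_equal_Is_count_even := by
  intro s _
  unfold Spec_Is_count_even
  simp only [Is_count_even, Is_count_even_alt]
  rw [replace_space_toList, foldl_filter_set, filter_set_of_nospace]
  rw [← main_lemma (s.toList.filter (fun c => c ∈ pvSet)).length _ 0 0 (le_refl _)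
      (fun ch h => by simpa using (List.mem_filter.mp h).2)]
  split <;> simp_all
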